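-- pv_equiv track=rewrite | github.com/immortal-shuan/PrLM | ner/ner_pro.py | gen_arg_tag
-- ===== SOURCE A (Python) =====
-- def gen_arg_tag(text_tokens, arg_tokens, arg_tag, tag_index):
--     tag_len = len(arg_tokens)
--     for i in range(len(text_tokens) - tag_len + 1):
--         is_i = True
--         for j in range(tag_len):
--             if arg_tokens[j] != text_tokens[i + j]:
--                 is_i = False
--                 break
--         if is_i == True:
--             if tag_len == 1:
--                 arg_tag[i] = tag_index[0]
--             else:
--                 arg_tag[i] = tag_index[0]
--                 arg_tag[i+1:i+tag_len] = [tag_index[1]]*(tag_len-1)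
--             break
--     return arg_tag
-- ===== SOURCE B (Python) =====
-- def gen_arg_tag(text_tokens, arg_tokens, arg_tag, tag_index):
--     m = len(arg_tokens)
--     n = len(text_tokens)
--     if m == 0 or m > n:
--         return arg_tag
--     fp = [len(t) for t in text_tokens]
--     target = sum(len(t) for t in arg_tokens)
--     w = sum(fp[:m])
--     i = 0
--     while True:
--         if w == target and text_tokens[i:i+m] == arg_tokens:
--             rest = [tag_index[1]] * (m - 1) if m > 1 else []
--             return arg_tag[:i] + [tag_index[0]] + rest + arg_tag[i+m:]
--         if i + m >= n:
--             return arg_tag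
--         w += fp[i+m] - fp[i]
--         i += 1
-- ===== Notes on version B (the rewrite author's own statement) =====
-- stated objective: alternative
-- what changed: Replaces the nested token-by-token scan with a Rabin-Karp-style rolling fingerprint (sum of token lengths) that filters candidate positions, comparing the full window only on fingerprint hits, and builds the result by list slicing instead of in-place index/slice assignment (return value only: A mutates arg_tag, B does not).
-- outside the precondition, e.g. on gen_arg_tag([], [], [9], [1, 2]): A returns [1], B returns [9]; on gen_arg_tag(['a', 'b'], ['a', 'b'], [0], [1, 2]): A returns [1, 2], B returns [1, 2]
import Mathlib
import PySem

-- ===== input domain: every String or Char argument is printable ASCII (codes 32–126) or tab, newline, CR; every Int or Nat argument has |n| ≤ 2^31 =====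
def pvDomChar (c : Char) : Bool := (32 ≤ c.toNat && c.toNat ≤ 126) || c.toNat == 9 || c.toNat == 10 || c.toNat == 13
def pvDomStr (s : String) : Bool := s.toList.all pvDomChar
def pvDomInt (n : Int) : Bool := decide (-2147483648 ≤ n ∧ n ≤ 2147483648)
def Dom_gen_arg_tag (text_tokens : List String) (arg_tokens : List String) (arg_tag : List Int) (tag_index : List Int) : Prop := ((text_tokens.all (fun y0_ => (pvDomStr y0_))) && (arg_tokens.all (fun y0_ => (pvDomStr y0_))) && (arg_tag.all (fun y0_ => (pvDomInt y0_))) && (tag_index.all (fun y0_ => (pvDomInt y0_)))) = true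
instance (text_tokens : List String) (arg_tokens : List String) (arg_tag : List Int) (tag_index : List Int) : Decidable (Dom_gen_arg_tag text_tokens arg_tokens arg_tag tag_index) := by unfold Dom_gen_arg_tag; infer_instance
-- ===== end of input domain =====

-- B replaces A's nested token-by-token scan with a rolling-fingerprint (sum of token lengths)
-- candidate filter plus a slice rebuild; the equivalence is about the RETURN value only
-- (the Python A mutates arg_tag in place, the Python B builds a fresh list).

-- ===== PORT A =====
-- inner 'for j in range(tag_len)' loop with break, returning is_i; fuel = tag_len - j
def gat_inner (arg_tokens text_tokens : List String) (i : Nat) : Nat → Nat → Bool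
  | _, 0 => true
  | j, fuel+1 =>
    if PySem.List.pyGetD arg_tokens (j : Int) "" ≠ PySem.List.pyGetD text_tokens ((i + j : Nat) : Int) "" then
      false
    else gat_inner arg_tokens text_tokens i (j+1) fuel

-- outer 'for i in range(len(text_tokens) - tag_len + 1)' loop with break; fuel = iterations left;
-- the slice assignment arg_tag[i+1:i+tag_len] = [t1]*(tag_len-1) is take/replicate/drop, exact for
-- the nonnegative clamped bounds i+1 ≤ i+tag_len that this branch (tag_len ≠ 1, tag_len ≥ 1) reaches
def gat_outer (text_tokens arg_tokens : List String) (arg_tag tag_index : List Int) (m : Nat) : Nat → Nat → List Int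
  | _, 0 => arg_tag
  | i, fuel+1 =>
    if gat_inner arg_tokens text_tokens i 0 m then
      if m = 1 then PySem.List.pySetD arg_tag (i : Int) (PySem.List.pyGetD tag_index 0 0)
      else
        let a1 := PySem.List.pySetD arg_tag (i : Int) (PySem.List.pyGetD tag_index 0 0)
        a1.take (i+1) ++ List.replicate (m-1) (PySem.List.pyGetD tag_index 1 0) ++ a1.drop (i+m)
    else gat_outer text_tokens arg_tokens arg_tag tag_index m (i+1) fuel

def gen_arg_tag (text_tokens : List String) (arg_tokens : List String) (arg_tag : List Int) (tag_index : List Int) : List Int :=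
  gat_outer text_tokens arg_tokens arg_tag tag_index arg_tokens.length 0
    (text_tokens.length + 1 - arg_tokens.length)

-- ===== PORT B =====
-- fp = [len(t) for t in tokens]
def gat_fp (l : List String) : List Int := l.map PySem.Str.len

-- arg_tag[:i] + [tag_index[0]] + ([tag_index[1]]*(m-1) if m > 1 else []) + arg_tag[i+m:]
def gat_rebuild (arg_tag tag_index : List Int) (i m : Nat) : List Int :=
  arg_tag.take i ++ [PySem.List.pyGetD tag_index 0 0] ++
    (if 1 < m then List.replicate (m-1) (PySem.List.pyGetD tag_index 1 0) else []) ++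
    arg_tag.drop (i+m)

-- the 'while True' loop; fuel = n - m + 1 bounds its iteration count
def gat_bloop (text_tokens arg_tokens : List String) (arg_tag tag_index : List Int)
    (fp : List Int) (target : Int) (m n : Nat) : Nat → Int → Nat → List Int
  | _, _, 0 => arg_tag
  | i, w, fuel+1 =>
    if w = target ∧ PySem.List.slice text_tokens (some (i : Int)) (some ((i : Int) + (m : Int))) = arg_tokens then
      gat_rebuild arg_tag tag_index i m
    else if n ≤ i + m then arg_tag
    else gat_bloop text_tokens arg_tokens arg_tag tag_index fp target m n
      (i+1) (w + PySem.List.pyGetD fp ((i + m : Nat) : Int) 0 - PySem.List.pyGetD fp (i : Int) 0) fuel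

def gen_arg_tag_alt (text_tokens : List String) (arg_tokens : List String) (arg_tag : List Int) (tag_index : List Int) : List Int :=
  if arg_tokens.length = 0 ∨ text_tokens.length < arg_tokens.length then arg_tag
  else
    gat_bloop text_tokens arg_tokens arg_tag tag_index (gat_fp text_tokens) ((gat_fp arg_tokens).sum)
      arg_tokens.length text_tokens.length 0
      (((gat_fp text_tokens).take arg_tokens.length).sum)
      (text_tokens.length + 1 - arg_tokens.length)

-- ===== PRECONDITION & SPEC =====
-- Pre_ excludes inputs where the pattern occurs in the text but tag_index or arg_tag is too short
-- for the tagging write (A raises IndexError, or — arg_tag shorter than text_tokens — A's slice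
-- assignment may silently grow arg_tag), and empty arg_tokens, on which A's lone write
-- arg_tag[0] = tag_index[0] for an empty pattern is an accident of its loop bounds.
def Pre_gen_arg_tag (text_tokens : List String) (arg_tokens : List String) (arg_tag : List Int) (tag_index : List Int) : Prop :=
  (¬ arg_tokens <:+: text_tokens) ∨
    (arg_tokens ≠ [] ∧ text_tokens.length ≤ arg_tag.length ∧
      (2 ≤ tag_index.length ∨ (arg_tokens.length = 1 ∧ 1 ≤ tag_index.length)))

instance (text_tokens : List String) (arg_tokens : List String) (arg_tag : List Int) (tag_index : List Int) : Decidable (Pre_gen_arg_tag text_tokens arg_tokens arg_tag tag_index) := by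
  unfold Pre_gen_arg_tag; infer_instance

def pvWitness_gen_arg_tag : List String × List String × List Int × List Int :=
  (["a", "b"], ["b"], [0, 0], [7, 8])

def Spec_gen_arg_tag (text_tokens : List String) (arg_tokens : List String) (arg_tag : List Int) (tag_index : List Int) (out : List Int) : Prop := out = gen_arg_tag_alt text_tokens arg_tokens arg_tag tag_index
instance (text_tokens : List String) (arg_tokens : List String) (arg_tag : List Int) (tag_index : List Int) (out : List Int) : Decidable (Spec_gen_arg_tag text_tokens arg_tokens arg_tag tag_index out) := by unfold Spec_gen_arg_tag; infer_instance

-- ===== CLAIM (what is proved, stated in full; the proofs are below) =====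
def Claim_equal_gen_arg_tag : Prop := ∀ (text_tokens : List String) (arg_tokens : List String) (arg_tag : List Int) (tag_index : List Int), Dom_gen_arg_tag text_tokens arg_tokens arg_tag tag_index → Pre_gen_arg_tag text_tokens arg_tokens arg_tag tag_index → Spec_gen_arg_tag text_tokens arg_tokens arg_tag tag_index (gen_arg_tag text_tokens arg_tokens arg_tag tag_index)

-- ===== LEMMAS AND PROOFS =====

-- A's inner loop decides window equality
lemma gat_inner_iff (arg text : List String) (i : Nat) :
    ∀ fuel j, j + fuel = arg.length → i + arg.length ≤ text.length →
      (gat_inner arg text i j fuel = true ↔ (text.drop (i+j)).take fuel = arg.drop j) := by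
  intro fuel
  induction fuel with
  | zero =>
    intro j hj _
    have h : arg.drop j = [] := List.drop_eq_nil_of_le (by omega)
    simp [gat_inner, h]
  | succ fuel ih =>
    intro j hj hn
    have hj' : j < arg.length := by omega
    have hij : i + j < text.length := by omega
    have ha : PySem.List.pyGetD arg (j : Int) "" = arg[j] := by
      rw [PySem.List.pyGetD_natCast]
      simp [List.getD_eq_getElem?_getD, List.getElem?_eq_getElem hj']
    have ht : PySem.List.pyGetD text ((i + j : Nat) : Int) "" = text[i + j] := by
      rw [PySem.List.pyGetD_natCast]
      simp [List.getD_eq_getElem?_getD, List.getElem?_eq_getElem hij]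
    have hdropt : text.drop (i + j) = text[i + j] :: text.drop (i + j + 1) :=
      (List.getElem_cons_drop hij).symm
    have hdropa : arg.drop j = arg[j] :: arg.drop (j + 1) :=
      (List.getElem_cons_drop hj').symm
    rw [gat_inner, ha, ht, hdropt, hdropa]
    by_cases he : arg[j] = text[i + j]
    · rw [if_neg (by simp [he]), ih (j+1) (by omega) hn]
      have h2 : i + (j + 1) = i + j + 1 := by omega
      rw [h2, List.take_succ_cons]
      simp [he]
    · rw [if_pos (by simp [he]), List.take_succ_cons]
      simp only [Bool.false_eq_true, false_iff]
      intro hcon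
      exact he (List.cons_eq_cons.mp hcon).1.symm

-- a matching window makes the pattern an infix of the text
lemma gat_window_infix (arg text : List String) (i m : Nat)
    (h : (text.drop i).take m = arg) : arg <:+: text := by
  refine ⟨text.take i, text.drop (i + m), ?_⟩
  rw [← h, List.append_assoc, List.drop_take_append_drop, List.take_append_drop]

-- a matching window has the pattern's fingerprint sum
lemma gat_window_sum (arg text : List String) (i m : Nat)
    (h : (text.drop i).take m = arg) :
    (((gat_fp text).drop i).take m).sum = (gat_fp arg).sum := by
  unfold gat_fp
  rw [← List.map_drop, ← List.map_take, h]

-- rolling-sum step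
lemma gat_getD_int (fp : List Int) (t : Nat) (h : t < fp.length) :
    PySem.List.pyGetD fp (t : Int) 0 = fp[t] := by
  rw [PySem.List.pyGetD_natCast]
  simp [List.getD_eq_getElem?_getD, List.getElem?_eq_getElem h]

lemma gat_roll (fp : List Int) (m i n : Nat) (hm : 1 ≤ m) (hfp : fp.length = n)
    (h : i + m < n) :
    ((fp.drop (i+1)).take m).sum =
      ((fp.drop i).take m).sum + PySem.List.pyGetD fp ((i + m : Nat) : Int) 0 - PySem.List.pyGetD fp ((i : Nat) : Int) 0 := by
  obtain ⟨k, rfl⟩ : ∃ k, m = k + 1 := ⟨m - 1, by omega⟩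
  have hi : i < fp.length := by omega
  have him : i + (k + 1) < fp.length := by omega
  have h1 : fp.drop i = fp[i] :: fp.drop (i + 1) := (List.getElem_cons_drop hi).symm
  have h2 : (fp.drop (i+1)).take (k+1) = (fp.drop (i+1)).take k ++ ((fp.drop (i+1))[k]?).toList :=
    List.take_succ
  have h3 : (fp.drop (i+1))[k]? = some fp[i + (k+1)] := by
    rw [List.getElem?_drop, show i + 1 + k = i + (k+1) by omega,
      List.getElem?_eq_getElem (by omega)]
  rw [gat_getD_int fp (i + (k+1)) him, gat_getD_int fp i hi, h2, h3, h1, List.take_succ_cons]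
  simp only [Option.toList_some, List.sum_append, List.sum_cons, List.sum_nil]
  ring

-- the two tagging writes build the same list
lemma gat_rebuild_eq (arg_tag : List Int) (t0 t1 : Int) (i m : Nat)
    (hm : 1 ≤ m) (hi : i + m ≤ arg_tag.length) :
    (if m = 1 then arg_tag.set i t0
     else
       (arg_tag.set i t0).take (i+1) ++ List.replicate (m-1) t1 ++ (arg_tag.set i t0).drop (i+m)) =
    arg_tag.take i ++ [t0] ++ (if 1 < m then List.replicate (m-1) t1 else []) ++ arg_tag.drop (i+m) := by
  have hilt : i < arg_tag.length := by omega
  have hset : arg_tag.set i t0 = arg_tag.take i ++ t0 :: arg_tag.drop (i+1) :=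
    List.set_eq_take_cons_drop t0 hilt
  have hlen : (arg_tag.take i).length = i := by
    rw [List.length_take]; omega
  by_cases h1 : m = 1
  · subst h1
    rw [if_pos rfl, if_neg (by omega), hset]
    simp
  · rw [if_neg h1, if_pos (by omega), hset]
    have htake : (arg_tag.take i ++ t0 :: arg_tag.drop (i+1)).take (i+1) = arg_tag.take i ++ [t0] := by
      rw [List.take_append, hlen]
      rw [List.take_of_length_le (by omega)]
      rw [show i + 1 - i = 1 by omega]
      simp
    have hdrop : (arg_tag.take i ++ t0 :: arg_tag.drop (i+1)).drop (i+m) = arg_tag.drop (i+m) := by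
      rw [List.drop_append, hlen]
      rw [List.drop_eq_nil_of_le (by rw [hlen]; omega)]
      rw [show i + m - i = m by omega]
      obtain ⟨k, rfl⟩ : ∃ k, m = k + 1 := ⟨m - 1, by omega⟩
      rw [List.drop_succ_cons, List.drop_drop, List.nil_append]
      congr 1
      omega
    rw [htake, hdrop]

-- the two loops agree step for step
lemma gat_loops_eq (text arg : List String) (arg_tag tag_index : List Int) (m n : Nat)
    (hm : m = arg.length) (hn : n = text.length) (h1 : 1 ≤ m) (hmn : m ≤ n)
    (Htag : ∀ i, i + m ≤ n → (text.drop i).take m = arg → i + m ≤ arg_tag.length) :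
    ∀ k i, i + k = n - m →
      gat_outer text arg arg_tag tag_index m i (k+1) =
        gat_bloop text arg arg_tag tag_index (gat_fp text) ((gat_fp arg).sum) m n i
          (((gat_fp text).drop i).take m).sum (k+1) := by
  intro k
  induction k with
  | zero =>
    intro i hik
    have hslice : PySem.List.slice text (some (i : Int)) (some ((i : Int) + (m : Int))) = (text.drop i).take m :=
      PySem.List.slice_natCast_add text i m
    have hin := gat_inner_iff arg text i m 0 (by omega) (by omega)
    simp only [Nat.add_zero] at hin
    rw [gat_outer, gat_bloop]
    by_cases hMt : (text.drop i).take m = arg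
    · have hcond : (((gat_fp text).drop i).take m).sum = (gat_fp arg).sum ∧
          PySem.List.slice text (some (i : Int)) (some ((i : Int) + (m : Int))) = arg :=
        ⟨gat_window_sum arg text i m hMt, hslice.trans hMt⟩
      rw [if_pos (hin.mpr hMt), if_pos hcond]
      simp only [PySem.List.pySetD_natCast, gat_rebuild]
      exact gat_rebuild_eq arg_tag (PySem.List.pyGetD tag_index 0 0) (PySem.List.pyGetD tag_index 1 0)
        i m h1 (Htag i (by omega) hMt)
    · rw [if_neg (by rw [hin]; exact hMt)]
      rw [if_neg (by rw [hslice]; exact fun hc => hMt hc.2)]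
      rw [if_pos (by omega : n ≤ i + m)]
      rw [gat_outer]
  | succ k ih =>
    intro i hik
    have him : i + m < n := by omega
    have hslice : PySem.List.slice text (some (i : Int)) (some ((i : Int) + (m : Int))) = (text.drop i).take m :=
      PySem.List.slice_natCast_add text i m
    have hin := gat_inner_iff arg text i m 0 (by omega) (by omega)
    simp only [Nat.add_zero] at hin
    rw [gat_outer, gat_bloop]
    by_cases hMt : (text.drop i).take m = arg
    · have hcond : (((gat_fp text).drop i).take m).sum = (gat_fp arg).sum ∧
          PySem.List.slice text (some (i : Int)) (some ((i : Int) + (m : Int))) = arg :=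
        ⟨gat_window_sum arg text i m hMt, hslice.trans hMt⟩
      rw [if_pos (hin.mpr hMt), if_pos hcond]
      simp only [PySem.List.pySetD_natCast, gat_rebuild]
      exact gat_rebuild_eq arg_tag (PySem.List.pyGetD tag_index 0 0) (PySem.List.pyGetD tag_index 1 0)
        i m h1 (Htag i (by omega) hMt)
    · rw [if_neg (by rw [hin]; exact hMt)]
      rw [if_neg (by rw [hslice]; exact fun hc => hMt hc.2)]
      rw [if_neg (by omega : ¬ n ≤ i + m)]
      have hroll := gat_roll (gat_fp text) m i n h1 (by simp [gat_fp, hn]) him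
      rw [← hroll]
      exact ih (i+1) (by omega)

-- ===== VERDICT (by name: the statement is the Claim_ definition above) =====
theorem gen_arg_tag_spec : Claim_equal_gen_arg_tag := by
  intro text arg arg_tag tag_index _ hpre
  unfold Spec_gen_arg_tag
  unfold gen_arg_tag gen_arg_tag_alt
  by_cases harg : arg = []
  · exfalso
    rcases hpre with h | h
    · subst harg
      exact h List.nil_infix
    · exact h.1 harg
  · have h1 : 1 ≤ arg.length := List.length_pos_of_ne_nil harg
    by_cases hmn : text.length < arg.length
    · rw [if_pos (Or.inr hmn)]
      rw [show text.length + 1 - arg.length = 0 by omega]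
      rw [gat_outer]
    · push_neg at hmn
      rw [if_neg (by omega)]
      have Htag : ∀ i, i + arg.length ≤ text.length →
          (text.drop i).take arg.length = arg → i + arg.length ≤ arg_tag.length := by
        intro i him hMt
        rcases hpre with h | h
        · exact absurd (gat_window_infix arg text i arg.length hMt) h
        · omega
      have key := gat_loops_eq text arg arg_tag tag_index arg.length text.length rfl rfl h1 hmn Htag
        (text.length - arg.length) 0 (by omega)
      rw [show text.length + 1 - arg.length = (text.length - arg.length) + 1 by omega, key]
      simp
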